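-- pv_equiv track=rewrite | github.com/jjmcdermott/Recompute | recompute/server/recompute.py | __get_test_scripts
-- ===== SOURCE A (Python) =====
-- def __get_test_scripts(travis_script):
--     envs = list()
--     before_scripts = list()
--     test_scripts = list()
--
--     if travis_script is not None:
--         if "before_script" in travis_script:
--             before_scripts.extend(travis_script["before_script"])
--
--         if "script" in travis_script:
--             test_scripts.extend(travis_script["script"])
--
--         if "env" in travis_script:
--             envs.extend(travis_script["env"])
--
--     # clean up
--     final_test_scripts = [script for script in before_scripts]
--     # non-tests statements
--     final_test_scripts.extend([s for s in test_scripts if not any(env.split("=", 1)[0] in s for env in envs)])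
--     # tests statements, interpolated with different env variables
--     for env in envs:
--         final_test_scripts.append(str("export " + env))
--         final_test_scripts.extend([s for s in test_scripts if env.split("=", 1)[0] in s])
--
--     return "\n  ".join(final_test_scripts) + "\n"
-- ===== SOURCE B (Python) =====
-- def __get_test_scripts(travis_script):
--     if travis_script is None:
--         travis_script = {}
--     before_scripts = list(travis_script.get("before_script", []))
--     test_scripts = list(travis_script.get("script", []))
--     envs = list(travis_script.get("env", []))
--     keys = [env.split("=", 1)[0] for env in envs]
--
--     # one pass over test_scripts: group each script under every matching env position
--     non_test = []
--     groups = [[] for _ in envs]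
--     for s in test_scripts:
--         hit = False
--         for i, k in enumerate(keys):
--             if k in s:
--                 groups[i].append(s)
--                 hit = True
--         if not hit:
--             non_test.append(s)
--
--     out = before_scripts + non_test
--     for env, group in zip(envs, groups):
--         out.append("export " + env)
--         out.extend(group)
--     return "\n  ".join(out) + "\n"
-- ===== Notes on version B (the rewrite author's own statement) =====
-- stated objective: alternative
-- what changed: A rescans test_scripts E+1 times (one 'any' filter pass plus one filter pass per env); B makes one grouping pass over test_scripts that buckets each script under every matching env position (and into a non-test list when none matches), then assembles the output from the buckets.
import Mathlib
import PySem

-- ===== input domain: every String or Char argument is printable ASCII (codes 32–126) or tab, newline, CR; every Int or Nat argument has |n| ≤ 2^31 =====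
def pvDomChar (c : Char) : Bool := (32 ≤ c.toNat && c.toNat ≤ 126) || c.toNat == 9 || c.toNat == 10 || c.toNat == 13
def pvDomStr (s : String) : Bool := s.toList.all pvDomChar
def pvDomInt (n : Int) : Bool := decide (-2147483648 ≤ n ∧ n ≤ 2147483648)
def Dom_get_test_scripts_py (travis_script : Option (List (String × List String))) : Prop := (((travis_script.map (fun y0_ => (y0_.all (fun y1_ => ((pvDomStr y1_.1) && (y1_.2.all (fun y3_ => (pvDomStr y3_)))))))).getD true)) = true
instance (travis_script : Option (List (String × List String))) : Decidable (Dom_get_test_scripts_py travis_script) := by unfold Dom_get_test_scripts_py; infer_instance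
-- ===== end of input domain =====

-- B replaces A's E+1 repeated scans of test_scripts by ONE grouping pass (per-env-position
-- buckets plus a non-test list) followed by an assembly pass; same return value, alternative shape.

-- env.split("=", 1)[0]
def pvEnvKey (env : String) : String :=
  (((PySem.Str.splitMax? env "=" 1).getD []).headD "")

-- ===== PORT A =====
def get_test_scripts_py (travis_script : Option (List (String × List String))) : String :=
  let st :=
    match travis_script with
    | none => (([] : List String), ([] : List String), ([] : List String))
    | some d =>
      let d : PySem.Dict String (List String) := ⟨d⟩
      let before_scripts := if d.contains "before_script" then [] ++ d.getD "before_script" [] else []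
      let test_scripts := if d.contains "script" then [] ++ d.getD "script" [] else []
      let envs := if d.contains "env" then [] ++ d.getD "env" [] else []
      (envs, before_scripts, test_scripts)
  let envs := st.1
  let before_scripts := st.2.1
  let test_scripts := st.2.2
  let final_test_scripts := before_scripts.map (fun script => script)
  let final_test_scripts := final_test_scripts ++
    test_scripts.filter (fun s => ! envs.any (fun env => PySem.Str.isIn (pvEnvKey env) s))
  let final_test_scripts := envs.foldl (fun acc env =>
    (acc ++ ["export " ++ env]) ++ test_scripts.filter (fun s => PySem.Str.isIn (pvEnvKey env) s))
    final_test_scripts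
  PySem.Str.join "\n  " final_test_scripts ++ "\n"

-- ===== PORT B =====
def get_test_scripts_py_alt (travis_script : Option (List (String × List String))) : String :=
  let d : PySem.Dict String (List String) := ⟨travis_script.getD []⟩
  let before_scripts := d.getD "before_script" []
  let test_scripts := d.getD "script" []
  let envs := d.getD "env" []
  let keys := envs.map pvEnvKey
  -- one pass over test_scripts: (non_test, groups), groups parallel to keys
  let st := test_scripts.foldl
    (fun (st : List String × List (List String)) s =>
      let hit := keys.any (fun k => PySem.Str.isIn k s)
      ((if hit then st.1 else st.1 ++ [s]),
       (st.2.zip keys).map (fun gk => if PySem.Str.isIn gk.2 s then gk.1 ++ [s] else gk.1)))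
    ([], keys.map (fun _ => []))
  let out := before_scripts ++ st.1 ++
    (envs.zip st.2).flatMap (fun eg => ("export " ++ eg.1) :: eg.2)
  PySem.Str.join "\n  " out ++ "\n"

-- ===== PRECONDITION & SPEC =====
def Spec_get_test_scripts_py (travis_script : Option (List (String × List String))) (out : String) : Prop := out = get_test_scripts_py_alt travis_script
instance (travis_script : Option (List (String × List String))) (out : String) : Decidable (Spec_get_test_scripts_py travis_script out) := by unfold Spec_get_test_scripts_py; infer_instance

-- ===== CLAIM (what is proved, stated in full; the proofs are below) =====
def Claim_equal_get_test_scripts_py : Prop := ∀ (travis_script : Option (List (String × List String))), Dom_get_test_scripts_py travis_script → Spec_get_test_scripts_py travis_script (get_test_scripts_py travis_script)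

-- ===== LEMMAS AND PROOFS =====

theorem pv_zip_zip_map {a b c d : Type} (g0 : List a) (keys : List b)
    (F : a × b → c) (G : c × b → d) :
    (((g0.zip keys).map F).zip keys).map G
      = (g0.zip keys).map (fun gk => G (F gk, gk.2)) := by
  induction g0 generalizing keys with
  | nil => simp
  | cons x xs ih =>
    cases keys with
    | nil => simp
    | cons k ks => simp [ih]

-- invariant of B's single grouping pass
theorem pv_fold_inv (ts : List String) (keys : List String)
    (n0 : List String) (g0 : List (List String)) (hlen : g0.length ≤ keys.length) :
    ts.foldl
      (fun (st : List String × List (List String)) s =>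
        ((if keys.any (fun k => PySem.Str.isIn k s) then st.1 else st.1 ++ [s]),
         (st.2.zip keys).map (fun gk => if PySem.Str.isIn gk.2 s then gk.1 ++ [s] else gk.1)))
      (n0, g0)
    = (n0 ++ ts.filter (fun s => ! keys.any (fun k => PySem.Str.isIn k s)),
       ((g0.zip keys).map (fun gk => gk.1 ++ ts.filter (fun s => PySem.Str.isIn gk.2 s)))) := by
  induction ts generalizing n0 g0 with
  | nil =>
    simp only [List.foldl_nil, List.filter_nil, List.append_nil]
    rw [show (fun (gk : List String × String) => gk.1) = Prod.fst from rfl,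
      List.map_fst_zip hlen]
  | cons s rest ih =>
    rw [List.foldl_cons]
    rw [ih _ _ (by simp)]
    rw [pv_zip_zip_map]
    simp only [Prod.mk.injEq]
    constructor
    · cases hA : keys.any (fun k => PySem.Str.isIn k s) <;>
        (rw [List.filter_cons]; simp only [hA]; simp [List.append_assoc])
    · apply List.map_congr_left
      intro gk _
      cases hk : PySem.Str.isIn gk.2 s <;>
        (rw [List.filter_cons]; simp only [hk]; simp [List.append_assoc])

theorem pv_zip_self {a : Type} (l : List a) : l.zip l = l.map (fun x => (x, x)) := by
  induction l with
  | nil => rfl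
  | cons x t ih =>
    rw [List.zip_cons_cons, ih, List.map_cons]

theorem pv_zip_map_flatMap {a b c : Type} (l : List a) (h : a → b) (f : a × b → List c) :
    (l.zip (l.map h)).flatMap f = l.flatMap (fun x => f (x, h x)) := by
  induction l with
  | nil => rfl
  | cons x t ih => simp [List.flatMap_cons, ih]

theorem pv_foldl_blocks (envs ts fts : List String) :
    envs.foldl (fun acc env =>
      (acc ++ ["export " ++ env]) ++ ts.filter (fun s => PySem.Str.isIn (pvEnvKey env) s)) fts
    = fts ++ envs.flatMap (fun env =>
        ("export " ++ env) :: ts.filter (fun s => PySem.Str.isIn (pvEnvKey env) s)) := by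
  induction envs generalizing fts with
  | nil => simp
  | cons e t ih => rw [List.foldl_cons, ih]; simp [List.flatMap_cons, List.append_assoc]

-- A's guarded extraction equals B's getD extraction
theorem pv_extract (d : PySem.Dict String (List String)) (k : String) :
    (if d.contains k then [] ++ d.getD k ([] : List String) else []) = d.getD k [] := by
  by_cases h : d.contains k = true
  · simp [h]
  · simp [h, PySem.Dict.getD_of_not_contains d ([] : List String)
      (by simpa using h)]

-- the whole body, at the level of the three extracted lists
theorem pv_main (before test envs : List String) :
    envs.foldl (fun acc env =>
        (acc ++ ["export " ++ env]) ++ test.filter (fun s => PySem.Str.isIn (pvEnvKey env) s))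
      (before.map (fun script => script) ++
        test.filter (fun s => ! envs.any (fun env => PySem.Str.isIn (pvEnvKey env) s)))
    = before ++ (test.foldl
        (fun (st : List String × List (List String)) s =>
          ((if (envs.map pvEnvKey).any (fun k => PySem.Str.isIn k s) then st.1 else st.1 ++ [s]),
           (st.2.zip (envs.map pvEnvKey)).map
             (fun gk => if PySem.Str.isIn gk.2 s then gk.1 ++ [s] else gk.1)))
        ([], (envs.map pvEnvKey).map (fun _ => []))).1 ++
      (envs.zip (test.foldl
        (fun (st : List String × List (List String)) s =>
          ((if (envs.map pvEnvKey).any (fun k => PySem.Str.isIn k s) then st.1 else st.1 ++ [s]),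
           (st.2.zip (envs.map pvEnvKey)).map
             (fun gk => if PySem.Str.isIn gk.2 s then gk.1 ++ [s] else gk.1)))
        ([], (envs.map pvEnvKey).map (fun _ => []))).2).flatMap
        (fun eg => ("export " ++ eg.1) :: eg.2) := by
  rw [pv_foldl_blocks]
  rw [pv_fold_inv test (envs.map pvEnvKey) [] ((envs.map pvEnvKey).map (fun _ => []))
    (by simp)]
  dsimp only
  rw [List.zip_map_left, pv_zip_self, List.map_map, List.map_map, List.map_map,
    pv_zip_map_flatMap]
  simp [Function.comp, List.any_map, Prod.map, List.append_assoc]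
  rfl

-- ===== VERDICT (by name: the statement is the Claim_ definition above) =====
theorem get_test_scripts_py_spec : Claim_equal_get_test_scripts_py := by
  intro ts _
  unfold Spec_get_test_scripts_py get_test_scripts_py get_test_scripts_py_alt
  cases ts with
  | none => rfl
  | some d =>
    simp only [Option.getD_some, pv_extract]
    rw [pv_main]
    rfl
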